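-- pv_equiv track=rewrite | github.com/broadinstitute/gatk-sv | module19_LR_benchmark/scripts/split_trv_by_motifs.py | classify_trv_by_motifs
-- ===== SOURCE A (Python) =====
-- def classify_trv_by_motifs(info_dict):
--     motifs_raw = info_dict.get('MOTIFS', '')
--     motifs = [m for m in motifs_raw.split(',') if m]
--
--     # Precedence: single-base first, then 2-base, then rest.
--     if any(len(m) == 1 for m in motifs):
--         return 'trv_motif_1bp'
--     if any(len(m) == 2 for m in motifs):
--         return 'trv_motif_2bp'
--     return 'trv_motif_rest'
-- ===== SOURCE B (Python) =====
-- def classify_trv_by_motifs(info_dict):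
--     # Single character-level scan: never builds the motif list at all.
--     raw = info_dict.get('MOTIFS', '')
--     seen1 = False
--     seen2 = False
--     run = 0
--     for ch in raw + ',':
--         if ch == ',':
--             if run == 1:
--                 seen1 = True
--             elif run == 2:
--                 seen2 = True
--             run = 0
--         else:
--             run += 1
--     if seen1:
--         return 'trv_motif_1bp'
--     if seen2:
--         return 'trv_motif_2bp'
--     return 'trv_motif_rest'
-- ===== Notes on version B (the rewrite author's own statement) =====
-- stated objective: alternative
-- what changed: Replaces A's split-into-a-list plus two any() existence scans by a single character-level scan of the raw string that counts run lengths between commas and records whether a length-1 or length-2 run was seen, never materialising the motif list.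
import Mathlib
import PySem

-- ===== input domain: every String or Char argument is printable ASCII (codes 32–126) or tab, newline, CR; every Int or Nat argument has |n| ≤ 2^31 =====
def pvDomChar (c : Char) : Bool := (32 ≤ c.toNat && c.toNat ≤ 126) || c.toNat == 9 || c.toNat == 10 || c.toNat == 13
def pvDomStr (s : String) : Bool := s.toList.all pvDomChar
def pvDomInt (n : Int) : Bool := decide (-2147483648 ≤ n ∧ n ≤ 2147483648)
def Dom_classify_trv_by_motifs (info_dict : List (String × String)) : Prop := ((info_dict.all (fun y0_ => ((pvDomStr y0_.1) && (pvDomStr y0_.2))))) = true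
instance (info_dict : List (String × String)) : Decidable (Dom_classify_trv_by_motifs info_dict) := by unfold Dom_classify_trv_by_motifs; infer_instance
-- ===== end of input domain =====

-- B replaces A's split-into-list + two any() scans by a single character-level run-length scan of the raw string (alternative decomposition, same cost).


-- ===== PORT A =====
-- str.split(',') is ported by hand as a structural recursion over the code-point list (cur holds the
-- reversed current piece); this is exact for the one-character separator ','.
-- Python's truthiness test 'if m' on a string is 'len(m) != 0'.
def pySplitComma : List Char → List Char → List (List Char)
  | [], cur => [cur.reverse]
  | c :: rest, cur => if c = ',' then cur.reverse :: pySplitComma rest [] else pySplitComma rest (c :: cur)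

def classify_trv_by_motifs (info_dict : List (String × String)) : String :=
  let motifs_raw := PySem.Dict.getD (PySem.Dict.ofList info_dict) "MOTIFS" ""
  let motifs := (pySplitComma motifs_raw.toList []).filter (fun m => m.length != 0)
  if motifs.any (fun m => m.length == 1) then "trv_motif_1bp"
  else if motifs.any (fun m => m.length == 2) then "trv_motif_2bp"
  else "trv_motif_rest"

-- ===== PORT B =====
-- Source B's for-loop over the characters of raw + ',' becomes a foldl over the code-point list with
-- state (run, seen1, seen2); the branch order matches the Python if/elif exactly.
def pvStepB (st : Nat × Bool × Bool) (c : Char) : Nat × Bool × Bool :=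
  if c = ',' then
    if st.1 == 1 then (0, true, st.2.2)
    else if st.1 == 2 then (0, st.2.1, true)
    else (0, st.2.1, st.2.2)
  else (st.1 + 1, st.2.1, st.2.2)

def classify_trv_by_motifs_alt (info_dict : List (String × String)) : String :=
  let raw := PySem.Dict.getD (PySem.Dict.ofList info_dict) "MOTIFS" ""
  let st := (raw.toList ++ [',']).foldl pvStepB (0, false, false)
  if st.2.1 then "trv_motif_1bp"
  else if st.2.2 then "trv_motif_2bp"
  else "trv_motif_rest"

-- ===== PRECONDITION & SPEC =====
def Spec_classify_trv_by_motifs (info_dict : List (String × String)) (out : String) : Prop := out = classify_trv_by_motifs_alt info_dict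
instance (info_dict : List (String × String)) (out : String) : Decidable (Spec_classify_trv_by_motifs info_dict out) := by unfold Spec_classify_trv_by_motifs; infer_instance

-- ===== CLAIM =====
def Claim_equal_classify_trv_by_motifs : Prop := ∀ (info_dict : List (String × String)), Dom_classify_trv_by_motifs info_dict → Spec_classify_trv_by_motifs info_dict (classify_trv_by_motifs info_dict)

-- ===== LEMMAS AND PROOFS =====

-- The scan invariant: folding pvStepB over cs ++ [','] from a run of length cur.length
-- records exactly whether some segment of pySplitComma cs cur has length 1 (resp. 2).
theorem pv_scan_inv (cs : List Char) : ∀ (cur : List Char) (s1 s2 : Bool),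
    (cs ++ [',']).foldl pvStepB (cur.length, s1, s2)
      = (0, s1 || (pySplitComma cs cur).any (fun m => m.length == 1),
            s2 || (pySplitComma cs cur).any (fun m => m.length == 2)) := by
  induction cs with
  | nil =>
    intro cur s1 s2
    simp only [List.nil_append, List.foldl_cons, List.foldl_nil, pySplitComma, List.any_cons,
      List.any_nil, Bool.or_false, List.length_reverse, pvStepB]
    by_cases h1 : cur.length = 1
    · simp [h1]
    · by_cases h2 : cur.length = 2 <;> simp [h1, h2]
  | cons c rest ih =>
    intro cur s1 s2
    by_cases hc : c = ','
    · subst hc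
      have step : pvStepB (cur.length, s1, s2) ','
          = (([] : List Char).length, s1 || cur.length == 1, s2 || cur.length == 2) := by
        unfold pvStepB
        by_cases h1 : cur.length = 1
        · simp [h1]
        · by_cases h2 : cur.length = 2 <;> simp [h1, h2]
      simp only [List.cons_append, List.foldl_cons, step, ih]
      simp [pySplitComma, Bool.or_assoc]
    · have step : pvStepB (cur.length, s1, s2) c = ((c :: cur).length, s1, s2) := by
        unfold pvStepB; simp [hc]
      simp only [List.cons_append, List.foldl_cons, step, ih]
      simp [pySplitComma, hc]

-- The empty-motif filter is invisible to the length-1 / length-2 existence tests.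
theorem pv_filter_any (l : List (List Char)) (k : Nat) (hk : k ≠ 0) :
    (l.filter (fun m => m.length != 0)).any (fun m => m.length == k)
      = l.any (fun m => m.length == k) := by
  rw [List.any_filter]
  congr 1
  funext m
  by_cases h : m.length = k
  · simp [h, hk]
  · simp [h]

-- ===== VERDICT =====
theorem classify_trv_by_motifs_spec : Claim_equal_classify_trv_by_motifs := by
  intro info_dict _
  unfold Spec_classify_trv_by_motifs classify_trv_by_motifs classify_trv_by_motifs_alt
  have hscan := pv_scan_inv ((PySem.Dict.getD (PySem.Dict.ofList info_dict) "MOTIFS" "").toList) [] false false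
  simp only [List.length_nil, Bool.false_or] at hscan
  simp only [hscan, pv_filter_any _ 1 (by omega), pv_filter_any _ 2 (by omega)]
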